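-- pv_equiv track=rewrite | github.com/laghzal49/A-maze-ing-42 | mazegen/forth_two.py | get_42_pattern
-- ===== SOURCE A (Python) =====
-- from typing import Set, Tuple
--
-- def get_42_pattern(start_x: int, start_y: int) -> Set[Tuple[int, int]]:
--     """
--     Get the cell coordinates that form the '42' pattern.
--     Each digit is 3 cells wide and 5 cells tall.
--
--     Args:
--         start_x: Starting x coordinate
--         start_y: Starting y coordinate
--
--     Returns:
--         Set of (x, y) coordinates forming '42'
--     """
--     # Pattern for '4' (3x5)
--     four_pattern = [
--         (0, 0), (0, 1), (0, 2),  # Left vertical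
--         (2, 0), (2, 1), (2, 2), (2, 3), (2, 4),  # Right vertical
--         (1, 2),  # Middle horizontal connection
--     ]
--
--     # Pattern for '2' (3x5)
--     two_pattern = [
--         (0, 0), (1, 0), (2, 0),  # Top horizontal
--         (2, 1),  # Right side
--         (0, 2), (1, 2), (2, 2),  # Middle horizontal
--         (0, 3),  # Left side
--         (0, 4), (1, 4), (2, 4),  # Bottom horizontal
--     ]
--
--     cells = set()
--
--     # Add '4' cells
--     for dx, dy in four_pattern:
--         cells.add((start_x + dx, start_y + dy))
--
--     # Add '2' cells (4 cells to the right with 1 cell gap)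
--     two_start_x = start_x + 4
--     for dx, dy in two_pattern:
--         cells.add((two_start_x + dx, start_y + dy))
--
--     return cells
-- ===== SOURCE B (Python) =====
-- def get_42_pattern(start_x: int, start_y: int) -> set:
--     """Geometric stroke decomposition: the '4' is two vertical bars plus a
--     crossbar cell, the '2' alternates full rows (even dy) with a single
--     side cell (right on row 1, left on row 3), generated by range loops."""
--     cells = set()
--     # digit '4': left bar (3 tall), right bar (5 tall), crossbar cell
--     for dy in range(3):
--         cells.add((start_x, start_y + dy))
--     for dy in range(5):
--         cells.add((start_x + 2, start_y + dy))
--     cells.add((start_x + 1, start_y + 2))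
--     # digit '2', offset 4 to the right: full row at even dy, else one side cell
--     x2 = start_x + 4
--     for dy in range(5):
--         if dy % 2 == 0:
--             for dx in range(3):
--                 cells.add((x2 + dx, start_y + dy))
--         else:
--             cells.add((x2 + (2 if dy == 1 else 0), start_y + dy))
--     return cells
-- ===== Notes on version B (the rewrite author's own statement) =====
-- stated objective: alternative
-- what changed: B generates the glyph cells geometrically with range loops over strokes (the '4' as two vertical bars plus a crossbar cell, the '2' as full rows at even dy and a single alternating side cell at odd dy) instead of A's two hard-coded lists of 20 coordinate tuples.
import Mathlib
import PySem

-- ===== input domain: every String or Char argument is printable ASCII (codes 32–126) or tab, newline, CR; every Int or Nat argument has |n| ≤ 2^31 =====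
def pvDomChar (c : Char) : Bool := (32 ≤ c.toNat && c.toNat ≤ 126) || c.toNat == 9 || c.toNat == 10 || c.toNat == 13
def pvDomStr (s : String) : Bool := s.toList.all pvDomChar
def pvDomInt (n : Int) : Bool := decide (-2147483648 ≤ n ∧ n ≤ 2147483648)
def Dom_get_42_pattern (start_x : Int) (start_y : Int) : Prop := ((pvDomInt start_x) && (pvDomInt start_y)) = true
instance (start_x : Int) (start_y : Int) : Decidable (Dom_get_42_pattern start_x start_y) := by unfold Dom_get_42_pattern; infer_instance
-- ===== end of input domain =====

-- B replaces A's two hard-coded coordinate lists by a geometric stroke decomposition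
-- (range loops over bars and rows of the glyphs); objective: alternative, not faster.

-- ===== PORT A =====
def get_42_pattern (start_x : Int) (start_y : Int) : List (Int × Int) :=
  let four_pattern : List (Int × Int) :=
    [(0, 0), (0, 1), (0, 2),
     (2, 0), (2, 1), (2, 2), (2, 3), (2, 4),
     (1, 2)]
  let two_pattern : List (Int × Int) :=
    [(0, 0), (1, 0), (2, 0),
     (2, 1),
     (0, 2), (1, 2), (2, 2),
     (0, 3),
     (0, 4), (1, 4), (2, 4)]
  -- cells = set(); add '4' cells
  let cells := four_pattern.foldl
    (fun c p => PySem.Set.add c (start_x + p.1, start_y + p.2)) PySem.Set.empty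
  -- add '2' cells, 4 to the right
  let two_start_x := start_x + 4
  two_pattern.foldl
    (fun c p => PySem.Set.add c (two_start_x + p.1, start_y + p.2)) cells

-- ===== PORT B =====
def get_42_pattern_alt (start_x : Int) (start_y : Int) : List (Int × Int) :=
  -- digit '4': left bar (3 tall), right bar (5 tall), crossbar cell
  let cells := (PySem.List.pyRange 0 3 1).foldl
    (fun c dy => PySem.Set.add c (start_x, start_y + dy)) PySem.Set.empty
  let cells := (PySem.List.pyRange 0 5 1).foldl
    (fun c dy => PySem.Set.add c (start_x + 2, start_y + dy)) cells
  let cells := PySem.Set.add cells (start_x + 1, start_y + 2)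
  -- digit '2', offset 4 to the right: full row at even dy, else one side cell
  let x2 := start_x + 4
  (PySem.List.pyRange 0 5 1).foldl
    (fun c dy =>
      if PySem.Int.mod dy 2 == 0 then
        (PySem.List.pyRange 0 3 1).foldl
          (fun c dx => PySem.Set.add c (x2 + dx, start_y + dy)) c
      else
        PySem.Set.add c (x2 + (if dy == 1 then 2 else 0), start_y + dy)) cells

-- ===== PRECONDITION & SPEC =====
def Spec_get_42_pattern (start_x : Int) (start_y : Int) (out : List (Int × Int)) : Prop := out = get_42_pattern_alt start_x start_y
instance (start_x : Int) (start_y : Int) (out : List (Int × Int)) : Decidable (Spec_get_42_pattern start_x start_y out) := by unfold Spec_get_42_pattern; infer_instance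

-- ===== CLAIM (what is proved, stated in full; the proofs are below) =====
def Claim_equal_get_42_pattern : Prop := ∀ (start_x : Int) (start_y : Int), Dom_get_42_pattern start_x start_y → Spec_get_42_pattern start_x start_y (get_42_pattern start_x start_y)

-- ===== LEMMAS AND PROOFS =====

-- ===== VERDICT (by name: the statement is the Claim_ definition above) =====
theorem get_42_pattern_spec : Claim_equal_get_42_pattern := by
  intro x y _
  unfold Spec_get_42_pattern
  simp [get_42_pattern, get_42_pattern_alt, PySem.Set.add, PySem.Set.contains,
    PySem.Set.empty, PySem.List.pyRange, PySem.Int.mod, add_assoc, add_right_inj,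
    add_eq_left, Prod.ext_iff, List.range_succ, Nat.cast_ofNat, Nat.cast_one, Int.fmod]
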